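-- pv_equiv track=rewrite | github.com/beekeeper-lab/docker-fundamentals | scripts/validate.py | rule_image_refs_have_plan
-- ===== SOURCE A (Python) =====
-- def rule_image_refs_have_plan(refs, entries) -> list[str]:
--     """Rule 1: every image ref maps to a plan entry."""
--     if not entries:
--         return []
--     planned = {e["normalized"] for e in entries}
--     errs: list[str] = []
--     for norm, locations in sorted(refs.items()):
--         if norm not in planned:
--             loc = ", ".join(f"{src}:{ln}" for src, ln in locations[:3])
--             errs.append(f"image ref not in plan: {norm}  ({loc})")
--     return errs
-- ===== SOURCE B (Python) =====
-- def rule_image_refs_have_plan(refs, entries) -> list[str]: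
--     """Rule 1: every image ref maps to a plan entry."""
--     if not entries:
--         return []
--     keys = sorted(refs)
--     planned = sorted({e["normalized"] for e in entries})
--     errs: list[str] = []
--     i = j = 0
--     n, m = len(keys), len(planned)
--     while i < n:
--         if j < m and planned[j] < keys[i]:
--             j += 1
--         elif j < m and planned[j] == keys[i]:
--             i += 1
--         else:
--             norm = keys[i]
--             loc = ", ".join(f"{src}:{ln}" for src, ln in refs[norm][:3])
--             errs.append(f"image ref not in plan: {norm}  ({loc})")
--             i += 1
--     return errs
-- ===== Notes on version B (the rewrite author's own statement) =====
-- stated objective: alternative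
-- what changed: B sorts the ref keys and the planned set separately and finds the missing refs by a two-pointer merge of the two sorted lists (no membership test per key), emitting the same formatted errors in the same order.
import Mathlib
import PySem

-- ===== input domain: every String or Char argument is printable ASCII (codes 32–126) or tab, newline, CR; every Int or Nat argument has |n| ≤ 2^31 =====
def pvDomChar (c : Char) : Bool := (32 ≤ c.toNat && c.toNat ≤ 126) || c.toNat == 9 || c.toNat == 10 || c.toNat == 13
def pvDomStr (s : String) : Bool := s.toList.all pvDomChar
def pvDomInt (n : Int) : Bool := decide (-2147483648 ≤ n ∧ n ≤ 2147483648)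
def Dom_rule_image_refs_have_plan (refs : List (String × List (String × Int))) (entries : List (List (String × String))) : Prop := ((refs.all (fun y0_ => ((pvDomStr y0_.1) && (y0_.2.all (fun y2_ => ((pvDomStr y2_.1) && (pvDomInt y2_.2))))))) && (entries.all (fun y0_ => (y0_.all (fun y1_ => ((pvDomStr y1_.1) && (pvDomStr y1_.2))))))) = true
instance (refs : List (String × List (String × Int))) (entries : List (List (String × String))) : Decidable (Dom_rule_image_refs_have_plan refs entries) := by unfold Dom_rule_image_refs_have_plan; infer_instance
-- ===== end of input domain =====

-- B finds missing refs by a two-pointer merge of the sorted ref keys against the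
-- sorted planned set instead of A's per-item membership test: alternative algorithm.


-- shared formatting helper: the identical f-string line of both Pythons
-- f"image ref not in plan: {norm}  ({', '.join(f'{src}:{ln}' for src, ln in locs)})"
def pvFmtErr (norm : String) (locs : List (String × Int)) : String :=
  "image ref not in plan: " ++ norm ++ "  (" ++
    PySem.Str.join ", " (locs.map (fun p => p.1 ++ ":" ++ PySem.Int.toStr p.2)) ++ ")"

-- e["normalized"]; under Pre_ the key is present, so getD's default is never used
def pvNormalized (e : List (String × String)) : String :=
  ((PySem.Dict.ofList e).get? "normalized").getD ""

-- ===== PORT A =====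
-- sorted(refs.items()) is ported as a sort by key: dict keys are unique, so Python's
-- tuple comparison is decided by the first component alone (exact).
def rule_image_refs_have_plan (refs : List (String × List (String × Int))) (entries : List (List (String × String))) : List String :=
  if entries = [] then []
  else
    let planned : PySem.Set String := PySem.Set.ofList (entries.map pvNormalized)
    (PySem.List.sorted ((PySem.Dict.ofList refs).items) (fun p => p.1) false).foldl
      (fun errs p =>
        if planned.contains p.1 then errs
        else errs ++ [pvFmtErr p.1 (PySem.List.slice p.2 none (some 3))])
      []

-- ===== PORT B =====
-- B's while loop over the two sorted lists with pointers i, j, transcribed as the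
-- structural recursion consuming the same lists in the same branch order; refs[norm]
-- is ported as getD: norm is a key of refs, so the lookup succeeds (exact).
def pvMergeLoop (d : PySem.Dict String (List (String × Int))) :
    List String → List String → List String
  | [], _ => []
  | k :: ks, [] =>
      pvFmtErr k (PySem.List.slice (d.getD k []) none (some 3)) :: pvMergeLoop d ks []
  | k :: ks, p :: ps =>
      if p < k then pvMergeLoop d (k :: ks) ps
      else if p = k then pvMergeLoop d ks (p :: ps)
      else pvFmtErr k (PySem.List.slice (d.getD k []) none (some 3)) :: pvMergeLoop d ks (p :: ps)
  termination_by ks ps => ks.length + ps.length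

def rule_image_refs_have_plan_alt (refs : List (String × List (String × Int))) (entries : List (List (String × String))) : List String :=
  if entries = [] then []
  else
    let d := PySem.Dict.ofList refs
    let keys := PySem.List.sorted d.keys (fun k => k) false
    let planned := PySem.List.sorted (PySem.Set.ofList (entries.map pvNormalized)) (fun k => k) false
    pvMergeLoop d keys planned

-- ===== PRECONDITION & SPEC =====
-- Pre_ excludes only inputs where Python A raises: an entry dict without the key
-- "normalized" makes e["normalized"] a KeyError (B raises there too).
def Pre_rule_image_refs_have_plan (refs : List (String × List (String × Int))) (entries : List (List (String × String))) : Prop :=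
  ∀ e ∈ entries, "normalized" ∈ e.map Prod.fst

instance (refs : List (String × List (String × Int))) (entries : List (List (String × String))) : Decidable (Pre_rule_image_refs_have_plan refs entries) := by unfold Pre_rule_image_refs_have_plan; infer_instance

def pvWitness_rule_image_refs_have_plan : (List (String × List (String × Int))) × (List (List (String × String))) :=
  ([("img:a", [("Dockerfile", 3)]), ("img:b", [])], [[("normalized", "img:b")]])

def Spec_rule_image_refs_have_plan (refs : List (String × List (String × Int))) (entries : List (List (String × String))) (out : List String) : Prop := out = rule_image_refs_have_plan_alt refs entries
instance (refs : List (String × List (String × Int))) (entries : List (List (String × String))) (out : List String) : Decidable (Spec_rule_image_refs_have_plan refs entries out) := by unfold Spec_rule_image_refs_have_plan; infer_instance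

-- ===== CLAIM (what is proved, stated in full; the proofs are below) =====
def Claim_equal_rule_image_refs_have_plan : Prop := ∀ (refs : List (String × List (String × Int))) (entries : List (List (String × String))), Dom_rule_image_refs_have_plan refs entries → Pre_rule_image_refs_have_plan refs entries → Spec_rule_image_refs_have_plan refs entries (rule_image_refs_have_plan refs entries)

-- ===== LEMMAS AND PROOFS =====

-- A's loop "if norm in planned: skip else append" as filter + map
theorem foldl_skip_append {α β : Type} (l : List α) (c : α → Bool) (f : α → β) (acc : List β) :
    l.foldl (fun errs p => if c p then errs else errs ++ [f p]) acc
      = acc ++ (l.filter (fun p => !c p)).map f := by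
  induction l generalizing acc with
  | nil => simp
  | cons x t ih =>
      by_cases h : c x = true <;>
        simp [List.foldl_cons, h, ih, List.append_assoc]

-- the merge of two sorted lists computes filter-by-non-membership
theorem pvMergeLoop_eq_filter (d : PySem.Dict String (List (String × Int)))
    (ks ps : List String) (hks : ks.Pairwise (· ≤ ·)) (hps : ps.Pairwise (· ≤ ·)) :
    pvMergeLoop d ks ps
      = (ks.filter (fun k => !ps.contains k)).map
          (fun k => pvFmtErr k (PySem.List.slice (d.getD k []) none (some 3))) := by
  induction ks, ps using pvMergeLoop.induct with
  | case1 ps => rw [pvMergeLoop]; simp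
  | case2 k ks ih =>
      rw [pvMergeLoop, ih (List.Pairwise.of_cons hks) hps]
      simp
  | case3 k ks p ps hlt ih =>
      -- p < k: no remaining key equals p (all are ≥ k > p)
      rw [pvMergeLoop, if_pos hlt, ih hks (List.Pairwise.of_cons hps)]
      congr 1
      apply List.filter_congr
      intro x hx
      have hkx : k ≤ x := by
        rcases List.mem_cons.mp hx with rfl | hx'
        · exact le_refl _
        · exact (List.pairwise_cons.mp hks).1 x hx'
      have hpx : ¬ x = p := by
        intro h; subst h
        exact absurd (lt_of_lt_of_le hlt hkx) (lt_irrefl x)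
      simp [List.contains_eq_mem, hpx]
  | case4 ks p ps hlt ih =>
      -- p = k: the key is planned, skipped by both sides
      rw [pvMergeLoop, if_neg hlt, if_pos rfl, ih (List.Pairwise.of_cons hks) hps]
      simp
  | case5 k ks p ps hlt heq ih =>
      -- k < p: k is missing (everything in p :: ps is ≥ p > k)
      have hkp : k < p := lt_of_le_of_ne (not_lt.mp hlt) (Ne.symm heq)
      have hknps : k ∉ ps := by
        intro hk
        have := (List.pairwise_cons.mp hps).1 k hk
        exact absurd (lt_of_lt_of_le hkp this) (lt_irrefl _)
      have hknp : ¬ k = p := Ne.symm heq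
      rw [pvMergeLoop, if_neg hlt, if_neg heq, ih (List.Pairwise.of_cons hks) hps]
      simp [hknp, hknps]

theorem rule_image_refs_have_plan_spec : Claim_equal_rule_image_refs_have_plan := by
  intro refs entries _hdom _hpre
  unfold Spec_rule_image_refs_have_plan
  unfold rule_image_refs_have_plan rule_image_refs_have_plan_alt
  by_cases hent : entries = []
  · simp [hent]
  · simp only [hent, if_false]
    set planned : PySem.Set String := PySem.Set.ofList (entries.map pvNormalized) with hplanned
    set d := PySem.Dict.ofList refs with hd
    set L := PySem.List.sorted d.items (fun p => p.1) false with hL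
    rw [foldl_skip_append, List.nil_append]
    have hLperm : L.Perm d.items := PySem.List.sorted_perm _ _ _
    have hkeysnd : d.keys.Nodup := PySem.Dict.nodup_keys_ofList refs
    have hLfstnd : (L.map Prod.fst).Nodup := by
      have : (L.map Prod.fst).Perm d.keys := hLperm.map Prod.fst
      exact this.nodup_iff.mpr hkeysnd
    -- sorted keys = fst-projection of the fst-sorted items
    have hLne : L.Pairwise (fun a b => a.1 ≠ b.1) := by
      have := hLfstnd
      rw [List.Nodup, List.pairwise_map] at this
      exact this
    have hLpw : L.Pairwise (fun a b => a.1 ≤ b.1) := PySem.List.sorted_pairwise _ _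
    have hLlt : L.Pairwise (fun a b => a.1 < b.1) :=
      (hLpw.and hLne).imp (fun h => lt_of_le_of_ne h.1 h.2)
    have hkeys : PySem.List.sorted d.keys (fun k => k) false = L.map Prod.fst :=
      PySem.List.sorted_eq_of_perm_of_pairwise_lt _ _ _
        (hLperm.map Prod.fst) (List.pairwise_map.mpr hLlt)
    set ps := PySem.List.sorted planned (fun k => k) false with hps
    have hpsperm : ps.Perm planned := PySem.List.sorted_perm _ _ _
    have hpspw : ps.Pairwise (· ≤ ·) := PySem.List.sorted_pairwise _ _
    rw [pvMergeLoop_eq_filter d _ ps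
          (hkeys ▸ List.pairwise_map.mpr hLpw) hpspw]
    rw [hkeys, List.filter_map, List.map_map]
    have hcont : ∀ k : String, ps.contains k = planned.contains k := by
      intro k; simp [List.contains_eq_mem, hpsperm.mem_iff]
    have hfilt : (L.filter (fun p => !ps.contains p.1))
        = L.filter (fun p => !planned.contains p.1) := by
      apply List.filter_congr
      intro p _; rw [hcont]
    simp only [Function.comp_def]
    rw [hfilt]
    apply List.map_congr_left
    intro p hpF
    obtain ⟨k, v⟩ := p
    rw [List.mem_filter] at hpF
    have hpit : (k, v) ∈ d.items := hLperm.mem_iff.mp hpF.1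
    have hgd : d.getD k [] = v := PySem.Dict.getD_of_mem_items d hpit hkeysnd []
    simp [hgd, pvFmtErr]
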